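-- pv_equiv track=rewrite | github.com/sevencentco/gatco-oauthlib | gatco_oauthlib/client.py | parse_options_header
-- ===== SOURCE A (Python) =====
-- def parse_options_header(ct):
--     ct_parts = str(ct).split(";", 1)
--     ct = ct_parts[0]
--     ct = ct.strip()
--     extra = ct_parts[1] if len(ct_parts) > 1 else ""
--     extra = extra.strip()
--     options = {}
--     if len(extra) < 1:
--         return ct, options
--     extra_chunks = extra.split(";")
--     extra_chunks2 = []
--     _ = [extra_chunks2.extend(e.split(",")) for e in extra_chunks]
--     extra_chunks3 = []
--     _ = [extra_chunks3.extend(e.split(" ")) for e in extra_chunks2]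
--
--     for e in extra_chunks3:
--         if "=" not in e:
--             continue
--         k, v = e.split("=", 1)
--         options[k.strip()] = v.strip()
--     return ct, options
-- ===== SOURCE B (Python) =====
-- def _add_option(options, tok):
--     eq = tok.find("=")
--     if eq >= 0:
--         options[tok[:eq].strip()] = tok[eq + 1:].strip()
--
--
-- def parse_options_header(ct):
--     parts = str(ct).split(";", 1)
--     head = parts[0].strip()
--     extra = (parts[1] if len(parts) > 1 else "").strip()
--     options = {}
--     if not extra:
--         return head, options
--     token = ""
--     for ch in extra:
--         if ch in ";, ":
--             _add_option(options, token)
--             token = ""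
--         else:
--             token += ch
--     _add_option(options, token)
--     return head, options
-- ===== Notes on version B (the rewrite author's own statement) =====
-- stated objective: alternative
-- what changed: B replaces A's three chained materializing split passes (';' then ',' then ' ') by a single left-to-right character scan over the extra string that accumulates one token at a time and flushes key=value tokens into the dict via a find-based split.
import Mathlib
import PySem

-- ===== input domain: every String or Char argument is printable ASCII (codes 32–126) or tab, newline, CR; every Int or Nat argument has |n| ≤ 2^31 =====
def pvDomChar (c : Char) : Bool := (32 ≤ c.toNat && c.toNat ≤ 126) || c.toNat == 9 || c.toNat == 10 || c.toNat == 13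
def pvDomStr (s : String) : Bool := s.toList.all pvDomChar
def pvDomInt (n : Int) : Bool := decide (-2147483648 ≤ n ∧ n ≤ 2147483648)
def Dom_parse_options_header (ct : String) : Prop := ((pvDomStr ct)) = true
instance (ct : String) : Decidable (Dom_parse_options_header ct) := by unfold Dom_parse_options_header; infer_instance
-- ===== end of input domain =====

-- B replaces A's three chained split passes by a single character scan that flushes key=value tokens.

-- ===== PORT A =====
def parse_options_header (ct : String) : String × (List (String × String)) :=
  let ct_parts := PySem.Chars.splitOnMax ct.toList [';'] 1
  let c := PySem.List.pyGetD ct_parts 0 []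
  let c := PySem.Chars.strip c
  let extra := if 1 < PySem.List.len ct_parts then PySem.List.pyGetD ct_parts 1 [] else []
  let extra := PySem.Chars.strip extra
  let options : PySem.Dict String String := PySem.Dict.empty
  if PySem.List.len extra < 1 then (String.ofList c, options.items)
  else
    let extra_chunks := PySem.Chars.splitOn extra [';']
    let extra_chunks2 := extra_chunks.foldl (fun acc e => acc ++ PySem.Chars.splitOn e [',']) []
    let extra_chunks3 := extra_chunks2.foldl (fun acc e => acc ++ PySem.Chars.splitOn e [' ']) []
    let options := extra_chunks3.foldl
      (fun (d : PySem.Dict String String) e =>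
        if PySem.Chars.isIn ['='] e then
          let kv := PySem.Chars.splitOnMax e ['='] 1
          d.insert (String.ofList (PySem.Chars.strip (PySem.List.pyGetD kv 0 [])))
                   (String.ofList (PySem.Chars.strip (PySem.List.pyGetD kv 1 [])))
        else d)
      options
    (String.ofList c, options.items)

-- ===== PORT B =====
-- Source B's _add_option: flush one token into the dict (find-based key=value split)
def pvAddOption (options : PySem.Dict String String) (tok : List Char) : PySem.Dict String String :=
  let eq := PySem.Chars.find tok ['=']
  if 0 ≤ eq then
    options.insert
      (String.ofList (PySem.Chars.strip (PySem.List.slice tok none (some eq))))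
      (String.ofList (PySem.Chars.strip (PySem.List.slice tok (some (eq + 1)) none)))
  else options

def parse_options_header_alt (ct : String) : String × (List (String × String)) :=
  let parts := PySem.Chars.splitOnMax ct.toList [';'] 1
  let head := PySem.Chars.strip (PySem.List.pyGetD parts 0 [])
  let extra := PySem.Chars.strip (if 1 < PySem.List.len parts then PySem.List.pyGetD parts 1 [] else [])
  let options : PySem.Dict String String := PySem.Dict.empty
  if extra = [] then (String.ofList head, options.items)
  else
    let st := extra.foldl
      (fun (s : PySem.Dict String String × List Char) ch =>
        if PySem.Chars.isIn [ch] [';', ',', ' '] then (pvAddOption s.1 s.2, [])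
        else (s.1, s.2 ++ [ch]))
      (options, [])
    (String.ofList head, (pvAddOption st.1 st.2).items)

-- ===== PRECONDITION & SPEC =====
def Spec_parse_options_header (ct : String) (out : String × (List (String × String))) : Prop := out = parse_options_header_alt ct
instance (ct : String) (out : String × (List (String × String))) : Decidable (Spec_parse_options_header ct out) := by unfold Spec_parse_options_header; infer_instance

-- ===== CLAIM (what is proved, stated in full; the proofs are below) =====
def Claim_equal_parse_options_header : Prop := ∀ (ct : String), Dom_parse_options_header ct → Spec_parse_options_header ct (parse_options_header ct)

-- ===== LEMMAS AND PROOFS =====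

-- generic split of a char list at every delimiter position (empty pieces kept)
def pvConsHead (c : Char) : List (List Char) → List (List Char)
  | [] => [[c]]
  | t :: ts => (c :: t) :: ts

def pvSplitC (p : Char → Bool) : List Char → List (List Char)
  | [] => [[]]
  | c :: cs => if p c then [] :: pvSplitC p cs else pvConsHead c (pvSplitC p cs)

def pvHeadGlue (pre : List Char) : List (List Char) → List (List Char)
  | [] => [pre]
  | t :: ts => (pre ++ t) :: ts

-- split at the FIRST occurrence of d, if any
def pvSplitFirst (d : Char) : List Char → Option (List Char × List Char)
  | [] => none
  | c :: cs => if c = d then some ([], cs) else (pvSplitFirst d cs).map (fun p => (c :: p.1, p.2))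

theorem pvSplitC_ne_nil (p : Char → Bool) (l : List Char) : pvSplitC p l ≠ [] := by
  cases l with
  | nil => simp [pvSplitC]
  | cons c cs =>
    simp only [pvSplitC]
    split
    · simp
    · cases h : pvSplitC p cs <;> simp [pvConsHead]

theorem pvSplitC_congr (p q : Char → Bool) (h : ∀ c, p c = q c) (l : List Char) :
    pvSplitC p l = pvSplitC q l := by
  induction l with
  | nil => rfl
  | cons c cs ih => simp only [pvSplitC, h c, ih]

theorem pvIsPrefixOf_single (d c : Char) (rest : List Char) :
    [d].isPrefixOf (c :: rest) = (d == c) := by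
  simp [List.isPrefixOf]

theorem pvSplitOn_go_single (d : Char) :
    ∀ (l : List Char) (fuel : Nat) (cur : List Char) (acc : List (List Char)), l.length ≤ fuel →
      PySem.Chars.splitOn.go [d] fuel l cur acc
        = acc.reverse ++ pvHeadGlue cur.reverse (pvSplitC (fun c => c == d) l) := by
  intro l
  induction l with
  | nil =>
    intro fuel cur acc _
    cases fuel <;> simp [PySem.Chars.splitOn.go, pvSplitC, pvHeadGlue]
  | cons c rest ih =>
    intro fuel cur acc hf
    cases fuel with
    | zero => simp at hf
    | succ f =>
      have hf' : rest.length ≤ f := by simpa using hf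
      by_cases hcd : c = d
      · subst hcd
        simp only [PySem.Chars.splitOn.go, pvIsPrefixOf_single, beq_self_eq_true, if_true,
          List.length_singleton, List.drop_succ_cons, List.drop_zero]
        rw [ih f [] (cur.reverse :: acc) hf']
        obtain ⟨t, ts, hts⟩ : ∃ t ts, pvSplitC (fun x => x == c) rest = t :: ts := by
          cases h : pvSplitC (fun x => x == c) rest with
          | nil => exact absurd h (pvSplitC_ne_nil _ _)
          | cons t ts => exact ⟨t, ts, rfl⟩
        simp [pvSplitC, pvHeadGlue, hts]
      · have hbd : (d == c) = false := by simp [Ne.symm hcd]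
        have hbc : (c == d) = false := by simp [hcd]
        simp only [PySem.Chars.splitOn.go, pvIsPrefixOf_single, hbd]
        rw [ih f (c :: cur) acc hf']
        obtain ⟨t, ts, hts⟩ : ∃ t ts, pvSplitC (fun x => x == d) rest = t :: ts := by
          cases h : pvSplitC (fun x => x == d) rest with
          | nil => exact absurd h (pvSplitC_ne_nil _ _)
          | cons t ts => exact ⟨t, ts, rfl⟩
        simp [pvSplitC, pvHeadGlue, hts, hbc, pvConsHead]

theorem pvSplitOn_single (d : Char) (l : List Char) :
    PySem.Chars.splitOn l [d] = pvSplitC (fun c => c == d) l := by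
  unfold PySem.Chars.splitOn
  rw [pvSplitOn_go_single d l (l.length + 1) [] [] (by omega)]
  obtain ⟨t, ts, hts⟩ : ∃ t ts, pvSplitC (fun c => c == d) l = t :: ts := by
    cases h : pvSplitC (fun c => c == d) l with
    | nil => exact absurd h (pvSplitC_ne_nil _ _)
    | cons t ts => exact ⟨t, ts, rfl⟩
  simp [hts, pvHeadGlue]

theorem pvFlatMap_splitC (p q : Char → Bool) (l : List Char) :
    (pvSplitC p l).flatMap (pvSplitC q) = pvSplitC (fun c => p c || q c) l := by
  induction l with
  | nil => simp [pvSplitC]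
  | cons c cs ih =>
    by_cases hp : p c
    · simp only [pvSplitC, hp, if_true, Bool.true_or, List.flatMap_cons, ih]
      rfl
    · obtain ⟨t, ts, hts⟩ : ∃ t ts, pvSplitC p cs = t :: ts := by
        cases h : pvSplitC p cs with
        | nil => exact absurd h (pvSplitC_ne_nil _ _)
        | cons t ts => exact ⟨t, ts, rfl⟩
      by_cases hq : q c
      · simp only [pvSplitC, hp, hq, if_true, Bool.false_eq_true, if_false, hts, pvConsHead,
          List.flatMap_cons]
        have h1 : (pvSplitC p cs).flatMap (pvSplitC q) = pvSplitC (fun c => p c || q c) cs := ih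
        rw [hts] at h1
        simp only [List.flatMap_cons] at h1
        simp [pvSplitC, hq, ← h1]
      · have ihc : pvSplitC q t ++ ts.flatMap (pvSplitC q) = pvSplitC (fun c => p c || q c) cs := by
          have h2 := ih; rw [hts] at h2; simpa using h2
        obtain ⟨u, us, hus⟩ : ∃ u us, pvSplitC q t = u :: us := by
          cases h : pvSplitC q t with
          | nil => exact absurd h (pvSplitC_ne_nil _ _)
          | cons u us => exact ⟨u, us, rfl⟩
        rw [hus] at ihc
        have hm : pvSplitC (fun c => p c || q c) cs
            = u :: (us ++ ts.flatMap (pvSplitC q)) := by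
          rw [← ihc]; rfl
        simp [pvSplitC, hp, hq, hts, hm, pvConsHead, hus]

theorem pvFind_go_single (d : Char) :
    ∀ (l : List Char) (k : Nat),
      PySem.Chars.find.go [d] l k
        = (match pvSplitFirst d l with
           | none => -1
           | some (a, _) => ((k : Int) + a.length)) := by
  intro l
  induction l with
  | nil => intro k; simp [PySem.Chars.find.go, pvSplitFirst]
  | cons c rest ih =>
    intro k
    by_cases hcd : c = d
    · subst hcd
      simp [PySem.Chars.find.go, pvIsPrefixOf_single, pvSplitFirst]
    · have hbd : (d == c) = false := by simp [Ne.symm hcd]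
      simp only [PySem.Chars.find.go, pvIsPrefixOf_single, hbd, Bool.false_eq_true, if_false,
        ih (k + 1), pvSplitFirst, hcd]
      cases h : pvSplitFirst d rest with
      | none => simp
      | some p => obtain ⟨p1, p2⟩ := p; push_cast; simp; ring

theorem pvSplitFirst_decomp (d : Char) :
    ∀ (l a b : List Char), pvSplitFirst d l = some (a, b) → l = a ++ d :: b := by
  intro l
  induction l with
  | nil => intro a b h; simp [pvSplitFirst] at h
  | cons c rest ih =>
    intro a b h
    by_cases hcd : c = d
    · subst hcd
      simp [pvSplitFirst] at h
      obtain ⟨ha, hb⟩ := h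
      subst ha; subst hb; simp
    · simp [pvSplitFirst, hcd] at h
      obtain ⟨a1, hp1, ha⟩ := h
      subst ha
      simp [ih a1 b hp1]

theorem pvSplitOnMax_go_zero (d : Char) (fuel : Nat) (l cur : List Char) (acc : List (List Char)) :
    PySem.Chars.splitOnMax.go [d] fuel 0 l cur acc = acc.reverse ++ [cur.reverse ++ l] := by
  cases fuel with
  | zero => simp [PySem.Chars.splitOnMax.go]
  | succ f => cases l <;> simp [PySem.Chars.splitOnMax.go]

theorem pvSplitOnMax_go_one (d : Char) :
    ∀ (l : List Char) (fuel : Nat) (cur : List Char) (acc : List (List Char)), l.length ≤ fuel →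
      PySem.Chars.splitOnMax.go [d] fuel 1 l cur acc
        = acc.reverse ++ (match pvSplitFirst d l with
            | none => [cur.reverse ++ l]
            | some (a, b) => [cur.reverse ++ a, b]) := by
  intro l
  induction l with
  | nil =>
    intro fuel cur acc _
    cases fuel <;> simp [PySem.Chars.splitOnMax.go, pvSplitFirst]
  | cons c rest ih =>
    intro fuel cur acc hf
    cases fuel with
    | zero => simp at hf
    | succ f =>
      have hf' : rest.length ≤ f := by simpa using hf
      by_cases hcd : c = d
      · subst hcd
        simp only [PySem.Chars.splitOnMax.go, pvIsPrefixOf_single, beq_self_eq_true, if_true,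
          List.length_singleton, List.drop_succ_cons, List.drop_zero, Nat.succ_ne_zero,
          reduceIte]
        rw [pvSplitOnMax_go_zero]
        simp [pvSplitFirst]
      · have hbd : (d == c) = false := by simp [Ne.symm hcd]
        simp only [PySem.Chars.splitOnMax.go, pvIsPrefixOf_single, hbd, Bool.false_eq_true,
          if_false, Nat.succ_ne_zero, reduceIte]
        rw [ih f (c :: cur) acc hf']
        simp only [pvSplitFirst, hcd, if_false]
        cases h : pvSplitFirst d rest with
        | none => simp
        | some p => obtain ⟨p1, p2⟩ := p; simp

theorem pvSplitOnMax_one (d : Char) (l : List Char) :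
    PySem.Chars.splitOnMax l [d] 1
      = (match pvSplitFirst d l with
         | none => [l]
         | some (a, b) => [a, b]) := by
  unfold PySem.Chars.splitOnMax
  rw [if_neg (by omega)]
  simp only [Int.toNat_one]
  rw [pvSplitOnMax_go_one d l (l.length + 1) [] [] (by omega)]
  cases h : pvSplitFirst d l with
  | none => simp
  | some p => obtain ⟨p1, p2⟩ := p; simp

-- the per-token update of A's loop equals Source B's _add_option
theorem pvBody_eq (d : PySem.Dict String String) (e : List Char) :
    (if PySem.Chars.isIn ['='] e then
      let kv := PySem.Chars.splitOnMax e ['='] 1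
      d.insert (String.ofList (PySem.Chars.strip (PySem.List.pyGetD kv 0 [])))
               (String.ofList (PySem.Chars.strip (PySem.List.pyGetD kv 1 [])))
     else d) = pvAddOption d e := by
  have hfind : PySem.Chars.find e ['='] =
      (match pvSplitFirst '=' e with
       | none => -1
       | some (a, _) => ((0 : Int) + a.length)) := by
    unfold PySem.Chars.find
    exact pvFind_go_single '=' e 0
  cases h : pvSplitFirst '=' e with
  | none =>
    rw [h] at hfind
    have hisIn : PySem.Chars.isIn ['='] e = false := by
      simp [PySem.Chars.isIn, hfind]
    rw [hisIn]
    simp only [pvAddOption, hfind]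
    norm_num
  | some p =>
    obtain ⟨ka, vb⟩ := p
    rw [h] at hfind
    simp only [zero_add] at hfind
    have hisIn : PySem.Chars.isIn ['='] e = true := by
      simp [PySem.Chars.isIn, hfind]
    have hdecomp : e = ka ++ '=' :: vb := pvSplitFirst_decomp '=' e ka vb h
    have hnn1 : (0 : Int) ≤ ((ka.length : Nat) : Int) := Int.natCast_nonneg ka.length
    have hnn2 : (0 : Int) ≤ ((ka.length : Nat) : Int) + 1 := add_nonneg hnn1 zero_le_one
    have h1 : (((ka.length : Nat) : Int) + 1).toNat = ka.length + 1 := by omega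
    have htake : PySem.List.slice e none (some ((ka.length : Nat) : Int)) = ka := by
      rw [PySem.List.slice_to e hnn1, hdecomp]
      simp
    have hdrop : PySem.List.slice e (some (((ka.length : Nat) : Int) + 1)) none = vb := by
      rw [PySem.List.slice_from e hnn2, hdecomp, h1]
      rw [show ka ++ '=' :: vb = (ka ++ ['=']) ++ vb by simp]
      rw [List.drop_left' (by simp)]
    rw [hisIn]
    simp only [if_true, pvSplitOnMax_one, h, hfind, pvAddOption, htake, hdrop]
    rw [if_pos hnn1]
    simp [PySem.List.pyGetD, PySem.List.pyGet?, PySem.List.pyIdx?]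

-- B's delimiter test is exactly membership in {';', ',', ' '}
theorem pvDelim_eq (c : Char) :
    PySem.Chars.isIn [c] [';', ',', ' '] = ((c == ';' || c == ',') || c == ' ') := by
  simp only [PySem.Chars.isIn, PySem.Chars.find, PySem.Chars.find.go, pvIsPrefixOf_single,
    List.isPrefixOf]
  split_ifs <;> simp_all

-- B's scan loop, run from any (dict, token) state, equals folding _add_option over the split
theorem pvScan (cs : List Char) :
    ∀ (d : PySem.Dict String String) (tok : List Char),
      (let r := cs.foldl
        (fun (s : PySem.Dict String String × List Char) ch =>
          if PySem.Chars.isIn [ch] [';', ',', ' '] then (pvAddOption s.1 s.2, [])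
          else (s.1, s.2 ++ [ch])) (d, tok)
       pvAddOption r.1 r.2)
      = (pvHeadGlue tok (pvSplitC (fun c => PySem.Chars.isIn [c] [';', ',', ' ']) cs)).foldl
          pvAddOption d := by
  induction cs with
  | nil => intro d tok; simp [pvSplitC, pvHeadGlue]
  | cons c cs ih =>
    intro d tok
    by_cases hc : PySem.Chars.isIn [c] [';', ',', ' '] = true
    · simp only [List.foldl_cons, hc, if_true, pvSplitC]
      rw [ih (pvAddOption d tok) []]
      obtain ⟨t, ts, hts⟩ : ∃ t ts,
          pvSplitC (fun c => PySem.Chars.isIn [c] [';', ',', ' ']) cs = t :: ts := by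
        cases h : pvSplitC (fun c => PySem.Chars.isIn [c] [';', ',', ' ']) cs with
        | nil => exact absurd h (pvSplitC_ne_nil _ _)
        | cons t ts => exact ⟨t, ts, rfl⟩
      simp [hts, pvHeadGlue]
    · simp only [Bool.not_eq_true] at hc
      simp only [List.foldl_cons, hc, Bool.false_eq_true, if_false, pvSplitC, pvConsHead]
      rw [ih d (tok ++ [c])]
      obtain ⟨t, ts, hts⟩ : ∃ t ts,
          pvSplitC (fun c => PySem.Chars.isIn [c] [';', ',', ' ']) cs = t :: ts := by
        cases h : pvSplitC (fun c => PySem.Chars.isIn [c] [';', ',', ' ']) cs with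
        | nil => exact absurd h (pvSplitC_ne_nil _ _)
        | cons t ts => exact ⟨t, ts, rfl⟩
      simp [hts, pvHeadGlue, pvConsHead]

-- ===== VERDICT (by name: the statement is the Claim_ definition above) =====
theorem parse_options_header_spec : Claim_equal_parse_options_header := by
  intro ct _
  unfold Spec_parse_options_header
  unfold parse_options_header parse_options_header_alt
  simp only []
  generalize (PySem.Chars.strip
      (if 1 < PySem.List.len (PySem.Chars.splitOnMax ct.toList [';'] 1) then
        PySem.List.pyGetD (PySem.Chars.splitOnMax ct.toList [';'] 1) 1 []
      else [])) = extra
  by_cases hx : extra = []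
  · subst hx
    norm_num [PySem.List.len_eq]
  · have hne : ¬ PySem.List.len extra < 1 := by
      rw [PySem.List.len_eq]
      have h0 : extra.length ≠ 0 := fun h => hx (List.length_eq_zero_iff.mp h)
      omega
    rw [if_neg hne, if_neg hx]
    refine Prod.ext rfl ?_
    simp only []
    congr 1
    -- A's chunk pipeline = pvSplitC over the merged delimiter predicate
    rw [PySem.List.foldl_append_eq_flatMap, PySem.List.foldl_append_eq_flatMap]
    simp only [List.nil_append]
    rw [pvSplitOn_single ';']
    have h2 : (pvSplitC (fun c => c == ';') extra).flatMap (fun e => PySem.Chars.splitOn e [','])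
        = pvSplitC (fun c => c == ';' || c == ',') extra := by
      rw [List.flatMap_congr (fun e _ => pvSplitOn_single ',' e)]
      exact pvFlatMap_splitC _ _ extra
    rw [h2]
    have h3 : (pvSplitC (fun c => c == ';' || c == ',') extra).flatMap
          (fun e => PySem.Chars.splitOn e [' '])
        = pvSplitC (fun c => (c == ';' || c == ',') || c == ' ') extra := by
      rw [List.flatMap_congr (fun e _ => pvSplitOn_single ' ' e)]
      exact pvFlatMap_splitC _ _ extra
    rw [h3]
    -- fold bodies agree tokenwise
    have hbody : (fun (d : PySem.Dict String String) e =>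
        if PySem.Chars.isIn ['='] e then
          let kv := PySem.Chars.splitOnMax e ['='] 1
          d.insert (String.ofList (PySem.Chars.strip (PySem.List.pyGetD kv 0 [])))
                   (String.ofList (PySem.Chars.strip (PySem.List.pyGetD kv 1 [])))
        else d) = pvAddOption := by
      funext d e
      exact pvBody_eq d e
    rw [hbody]
    -- B's scan loop = a fold of _add_option over the same token split
    rw [pvScan extra PySem.Dict.empty []]
    rw [pvSplitC_congr _ _ pvDelim_eq extra]
    obtain ⟨t, ts, hts⟩ : ∃ t ts,
        pvSplitC (fun c => (c == ';' || c == ',') || c == ' ') extra = t :: ts := by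
      cases h : pvSplitC (fun c => (c == ';' || c == ',') || c == ' ') extra with
      | nil => exact absurd h (pvSplitC_ne_nil _ _)
      | cons t ts => exact ⟨t, ts, rfl⟩
    simp [hts, pvHeadGlue]
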